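-- pv_equiv track=rewrite | github.com/TieranChan/FYDP | database_operations/Database.py | parse_size_to_dict
-- ===== SOURCE A (Python) =====
-- def parse_size_to_dict(size_str):
--     """Convert a size string or dictionary into a dictionary."""
--     if isinstance(size_str, dict):
--         return size_str  # Already a dictionary, return as is
--     size_dict = {"length": "", "width": "", "height": ""}
--     if isinstance(size_str, str):
--         size_parts = size_str.split()
--         for part in size_parts:
--             if part.startswith("Length:"):
--                 size_dict["length"] = part.split(":")[1].strip()
--             elif part.startswith("Width:"):
--                 size_dict["width"] = part.split(":")[1].strip()
--             elif part.startswith("Height:"):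
--                 size_dict["height"] = part.split(":")[1].strip()
--     return size_dict
-- ===== SOURCE B (Python) =====
-- def parse_size_to_dict(size_str):
--     """Convert a size string or dictionary into a dictionary."""
--     if isinstance(size_str, dict):
--         return size_str  # Already a dictionary, return as is
--     size_dict = {"length": "", "width": "", "height": ""}
--     if isinstance(size_str, str):
--         parts = size_str.split()
--         # For each field, take the LAST matching token (= first in reverse).
--         for key, tag in (("length", "Length:"), ("width", "Width:"), ("height", "Height:")):
--             for part in reversed(parts):
--                 if part.startswith(tag):
--                     size_dict[key] = part.split(":")[1].strip()
--                     break
--     return size_dict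
-- ===== Notes on version B (the rewrite author's own statement) =====
-- stated objective: alternative
-- what changed: Replaces A's single forward token loop with if/elif dict overwrites by three independent per-field scans over the reversed token list, each taking the first (i.e. last overall) token with the field's prefix.
import Mathlib
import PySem

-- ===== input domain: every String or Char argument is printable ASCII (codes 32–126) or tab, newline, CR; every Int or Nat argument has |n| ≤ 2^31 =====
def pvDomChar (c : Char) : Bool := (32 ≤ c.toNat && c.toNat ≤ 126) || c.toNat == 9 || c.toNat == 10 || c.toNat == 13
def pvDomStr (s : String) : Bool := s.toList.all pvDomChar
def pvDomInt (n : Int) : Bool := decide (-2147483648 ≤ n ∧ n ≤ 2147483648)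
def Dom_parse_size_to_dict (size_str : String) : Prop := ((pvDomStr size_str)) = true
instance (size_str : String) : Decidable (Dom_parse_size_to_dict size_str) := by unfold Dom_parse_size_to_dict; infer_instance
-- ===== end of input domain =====

-- B replaces A's single forward token loop (if/elif, later tokens overwrite) by three independent
-- per-field scans of the reversed token list, each taking the first (= last overall) matching token.
-- Both Pythons also accept a dict argument and return it unchanged; under the String type convention
-- only the str branch is modelled. Equivalence is about the return value (neither mutates its input).

-- ===== PORT A =====
-- part.split(":")[1].strip(); whenever either program evaluates this, part starts with "…:", so
-- index 1 exists and the .getD "" defaults are unreachable (no IndexError to exclude).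
def pvVal (part : String) : String :=
  PySem.Str.strip ((PySem.List.pyGet? ((PySem.Str.split? part ":").getD []) 1).getD "")

def pvAStep (d : PySem.Dict String String) (part : String) : PySem.Dict String String :=
  if PySem.Str.startswith part "Length:" then d.insert "length" (pvVal part)
  else if PySem.Str.startswith part "Width:" then d.insert "width" (pvVal part)
  else if PySem.Str.startswith part "Height:" then d.insert "height" (pvVal part)
  else d

def parse_size_to_dict (size_str : String) : List (String × String) :=
  ((PySem.Str.split₀ size_str).foldl pvAStep
    (PySem.Dict.ofList [("length", ""), ("width", ""), ("height", "")])).items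

-- ===== PORT B =====
-- 'for part in reversed(parts): if part.startswith(tag): …; break' = first match in the reversed list
def pvBPick (parts : List String) (tag : String) : Option String :=
  parts.reverse.find? (fun p => PySem.Str.startswith p tag)

def parse_size_to_dict_alt (size_str : String) : List (String × String) :=
  let parts := PySem.Str.split₀ size_str
  (([(("length" : String), ("Length:" : String)), ("width", "Width:"), ("height", "Height:")]).foldl
    (fun d kt =>
      match pvBPick parts kt.2 with
      | some part => d.insert kt.1 (pvVal part)
      | none => d)
    (PySem.Dict.ofList [("length", ""), ("width", ""), ("height", "")])).items

-- ===== PRECONDITION & SPEC =====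
def Spec_parse_size_to_dict (size_str : String) (out : List (String × String)) : Prop := out = parse_size_to_dict_alt size_str
instance (size_str : String) (out : List (String × String)) : Decidable (Spec_parse_size_to_dict size_str out) := by unfold Spec_parse_size_to_dict; infer_instance

-- ===== CLAIM (what is proved, stated in full; the proofs are below) =====
def Claim_equal_parse_size_to_dict : Prop := ∀ (size_str : String), Dom_parse_size_to_dict size_str → Spec_parse_size_to_dict size_str (parse_size_to_dict size_str)

-- ===== LEMMAS AND PROOFS =====

-- the per-field residue of A's forward loop
def pvFA (tag : String) (parts : List String) (v : String) : String :=
  parts.foldl (fun acc p => if PySem.Str.startswith p tag then pvVal p else acc) v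

lemma pv_sw_head (p t : String) (h : PySem.Str.startswith p t = true) :
    ∀ c cs, t.toList = c :: cs → p.toList.head? = some c := by
  simp only [PySem.Str.startswith_eq] at h
  rw [PySem.Chars.startswith_iff] at h
  intro c cs ht
  obtain ⟨r, e⟩ := h
  rw [ht] at e
  rw [← e]
  rfl

lemma pv_ins_length (l w h v : String) :
    (PySem.Dict.mk [("length", l), ("width", w), ("height", h)]).insert "length" v
      = PySem.Dict.mk [("length", v), ("width", w), ("height", h)] := rfl

lemma pv_ins_width (l w h v : String) :
    (PySem.Dict.mk [("length", l), ("width", w), ("height", h)]).insert "width" v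
      = PySem.Dict.mk [("length", l), ("width", v), ("height", h)] := rfl

lemma pv_ins_height (l w h v : String) :
    (PySem.Dict.mk [("length", l), ("width", w), ("height", h)]).insert "height" v
      = PySem.Dict.mk [("length", l), ("width", w), ("height", v)] := rfl

lemma pv_step_shape (l w h p : String) :
    pvAStep (PySem.Dict.mk [("length", l), ("width", w), ("height", h)]) p
      = PySem.Dict.mk
          [("length", if PySem.Str.startswith p "Length:" then pvVal p else l),
           ("width", if PySem.Str.startswith p "Width:" then pvVal p else w),
           ("height", if PySem.Str.startswith p "Height:" then pvVal p else h)] := by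
  unfold pvAStep
  by_cases hL : PySem.Str.startswith p "Length:" = true
  · have hW : PySem.Str.startswith p "Width:" = false := by
      by_contra hc
      have hc' : PySem.Str.startswith p "Width:" = true := by
        revert hc; cases PySem.Str.startswith p "Width:" <;> simp
      have e1 := pv_sw_head p "Length:" hL 'L' "ength:".toList rfl
      have e2 := pv_sw_head p "Width:" hc' 'W' "idth:".toList rfl
      rw [e1] at e2; simp at e2
    have hH : PySem.Str.startswith p "Height:" = false := by
      by_contra hc
      have hc' : PySem.Str.startswith p "Height:" = true := by
        revert hc; cases PySem.Str.startswith p "Height:" <;> simp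
      have e1 := pv_sw_head p "Length:" hL 'L' "ength:".toList rfl
      have e2 := pv_sw_head p "Height:" hc' 'H' "eight:".toList rfl
      rw [e1] at e2; simp at e2
    rw [hL, hW, hH]
    simp [pv_ins_length]
  · rw [Bool.not_eq_true] at hL
    rw [hL]
    by_cases hW : PySem.Str.startswith p "Width:" = true
    · have hH : PySem.Str.startswith p "Height:" = false := by
        by_contra hc
        have hc' : PySem.Str.startswith p "Height:" = true := by
          revert hc; cases PySem.Str.startswith p "Height:" <;> simp
        have e1 := pv_sw_head p "Width:" hW 'W' "idth:".toList rfl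
        have e2 := pv_sw_head p "Height:" hc' 'H' "eight:".toList rfl
        rw [e1] at e2; simp at e2
      rw [hW, hH]
      simp [pv_ins_width]
    · rw [Bool.not_eq_true] at hW
      rw [hW]
      by_cases hH : PySem.Str.startswith p "Height:" = true
      · rw [hH]; simp [pv_ins_height]
      · rw [Bool.not_eq_true] at hH
        rw [hH]
        simp

lemma pv_foldA (parts : List String) (l w h : String) :
    parts.foldl pvAStep (PySem.Dict.mk [("length", l), ("width", w), ("height", h)])
      = PySem.Dict.mk
          [("length", pvFA "Length:" parts l),
           ("width", pvFA "Width:" parts w),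
           ("height", pvFA "Height:" parts h)] := by
  induction parts generalizing l w h with
  | nil => rfl
  | cons p ps ih =>
      simp only [List.foldl_cons, pv_step_shape]
      rw [ih]
      rfl

lemma pv_fA_find (tag : String) (parts : List String) (v : String) :
    pvFA tag parts v
      = (match pvBPick parts tag with
         | some p => pvVal p
         | none => v) := by
  unfold pvBPick
  induction parts using List.reverseRecOn generalizing v with
  | nil => rfl
  | append_singleton ps p ih =>
      unfold pvFA
      rw [List.foldl_append]
      simp only [List.foldl_cons, List.foldl_nil, List.reverse_append, List.reverse_singleton,
        List.singleton_append, List.find?_cons]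
      by_cases hp : PySem.Str.startswith p tag = true
      · rw [hp]
        rfl
      · rw [Bool.not_eq_true] at hp
        rw [hp]
        exact ih v

lemma pv_foldB (parts : List String) :
    (([(("length" : String), ("Length:" : String)), ("width", "Width:"), ("height", "Height:")]).foldl
      (fun d kt =>
        match pvBPick parts kt.2 with
        | some part => d.insert kt.1 (pvVal part)
        | none => d)
      (PySem.Dict.ofList [("length", ""), ("width", ""), ("height", "")]))
    = PySem.Dict.mk
        [("length", match pvBPick parts "Length:" with | some p => pvVal p | none => ""),
         ("width", match pvBPick parts "Width:" with | some p => pvVal p | none => ""),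
         ("height", match pvBPick parts "Height:" with | some p => pvVal p | none => "")] := by
  simp only [List.foldl_cons, List.foldl_nil]
  cases hL : pvBPick parts "Length:" <;>
    cases hW : pvBPick parts "Width:" <;>
      cases hH : pvBPick parts "Height:" <;>
        rfl

-- ===== VERDICT (by name: the statement is the Claim_ definition above) =====
theorem parse_size_to_dict_spec : Claim_equal_parse_size_to_dict := by
  intro size_str _
  unfold Spec_parse_size_to_dict parse_size_to_dict parse_size_to_dict_alt
  dsimp only
  rw [pv_foldB]
  have hof : PySem.Dict.ofList [(("length" : String), ("" : String)), ("width", ""), ("height", "")]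
      = PySem.Dict.mk [("length", ""), ("width", ""), ("height", "")] := rfl
  rw [hof, pv_foldA]
  rw [pv_fA_find, pv_fA_find, pv_fA_find]
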